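-- pv_equiv track=rewrite | github.com/EVAN96KWON/Coding_Tests | 프로그래머스/2/340212. ［PCCP 기출문제］ 2번 ／ 퍼즐 게임 챌린지/［PCCP 기출문제］ 2번 ／ 퍼즐 게임 챌린지.py | solution
-- ===== SOURCE A (Python) =====
-- def solution(diffs, times, limit):
--     def solve_by_level(level):
--         return sum(
--             [
--                 (p + t) * max(0, (d - level)) + t
--                 for d, t, p in zip(diffs, times, prev_times)
--             ]
--         )
--
--     answer = 0
--     prev_times = [0] + times
--
--     left, right = 1, max(diffs) + 1
--     while left < right:
--         mid = (left + right) // 2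
--         if solve_by_level(mid) <= limit:
--             answer = mid
--             right = mid
--         else:
--             left = mid + 1
--
--     return answer
-- ===== SOURCE B (Python) =====
-- def solution(diffs, times, limit):
--     prev_times = [0] + times
--     trip = list(zip(diffs, times, prev_times))
--     T = sum(t for d, t, p in trip)
--     pairs = sorted(((d, t + p) for d, t, p in trip), key=lambda y: y[0])
--     n = len(pairs)
--     suf = [(0, 0)] * (n + 1)
--     for i in range(n - 1, -1, -1):
--         d, w = pairs[i]
--         s, ww = suf[i + 1]
--         suf[i] = (s + w, ww + d * w)
--
--     def total(level):
--         lo, hi = 0, n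
--         while lo < hi:
--             m = (lo + hi) // 2
--             if pairs[m][0] <= level:
--                 lo = m + 1
--             else:
--                 hi = m
--         s, ww = suf[lo]
--         return T + ww - level * s
--
--     answer = 0
--     left, right = 1, max(diffs) + 1
--     while left < right:
--         mid = (left + right) // 2
--         if total(mid) <= limit:
--             answer = mid
--             right = mid
--         else:
--             left = mid + 1
--     return answer
-- ===== Notes on version B (the rewrite author's own statement) =====
-- stated objective: faster
-- what changed: Keeps A's outer binary search over levels (its probing is observable on non-monotone inputs) but removes the O(n) inner scan per probe: the puzzles are sorted by difficulty once, suffix sums of the retry weights are precomputed, and each probe's total is then one O(log n) bisect plus a closed-form evaluation.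
import Mathlib
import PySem

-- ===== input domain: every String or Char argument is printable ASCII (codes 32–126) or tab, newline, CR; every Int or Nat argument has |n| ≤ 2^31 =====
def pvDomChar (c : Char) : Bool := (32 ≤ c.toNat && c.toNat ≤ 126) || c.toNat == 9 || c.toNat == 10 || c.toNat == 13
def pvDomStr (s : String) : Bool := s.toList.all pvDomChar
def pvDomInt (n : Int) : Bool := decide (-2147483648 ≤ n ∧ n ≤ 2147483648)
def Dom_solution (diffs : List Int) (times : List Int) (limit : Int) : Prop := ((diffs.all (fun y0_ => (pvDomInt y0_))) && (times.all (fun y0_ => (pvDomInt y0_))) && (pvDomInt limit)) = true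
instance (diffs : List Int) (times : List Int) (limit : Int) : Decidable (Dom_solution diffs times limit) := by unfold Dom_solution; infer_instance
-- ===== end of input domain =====

-- B keeps A's outer binary search but replaces the O(n) per-probe rescan of all
-- puzzles by a one-off sort with suffix sums and an O(log n) bisect per probe.

-- ===== PORT A =====
-- Python's nested solve_by_level(level): sum of a list comprehension over zip.
def solveByLevel (diffs times prev_times : List Int) (level : Int) : Int :=
  ((diffs.zip (times.zip prev_times)).map
    (fun dtp => (dtp.2.2 + dtp.2.1) * max 0 (dtp.1 - level) + dtp.2.1)).sum

-- the 'while left < right' loop, verbatim in both Pythons; p is the limit test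
def solutionLoop (p : Int → Bool) (left right answer : Int) : Int :=
  if h : left < right then
    if p (PySem.Int.floordiv (left + right) 2) then
      solutionLoop p left (PySem.Int.floordiv (left + right) 2)
        (PySem.Int.floordiv (left + right) 2)
    else
      solutionLoop p (PySem.Int.floordiv (left + right) 2 + 1) right answer
  else answer
termination_by (right - left).toNat
decreasing_by
  · have h1 := (PySem.Int.floordiv_two_mid_bounds (le_of_lt h)).1
    have h2 : PySem.Int.floordiv (left + right) 2 < right := by
      rw [PySem.Int.floordiv_lt_iff_lt_mul (by norm_num)]; omega
    omega
  · have h1 := (PySem.Int.floordiv_two_mid_bounds (le_of_lt h)).1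
    omega

def solution (diffs : List Int) (times : List Int) (limit : Int) : Int :=
  let prev_times := 0 :: times
  -- max(diffs): Python raises ValueError on empty diffs; excluded by Pre_solution
  match PySem.List.max? diffs (fun x => x) with
  | none => 0
  | some m =>
      solutionLoop (fun mid => decide (solveByLevel diffs times prev_times mid ≤ limit))
        1 (m + 1) 0

-- ===== PORT B =====
-- Source B's 'for i in reversed(range(n))' filling suf: suffix sums (Σw, Σd*w), length n+1
def sufSums : List (Int × Int) → List (Int × Int)
  | [] => [(0, 0)]
  | (d, w) :: rest =>
    match sufSums rest with
    | [] => [(0, 0)]  -- unreachable: sufSums always returns a nonempty list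
    | (s, ww) :: tl => (s + w, ww + d * w) :: (s, ww) :: tl

-- Source B's hand-rolled bisect in total(): indices are nonnegative, so Nat
def bisectLoop (pairs : List (Int × Int)) (level : Int) (lo hi : Nat) : Nat :=
  if h : lo < hi then
    if (pairs.getD ((lo + hi) / 2) (0, 0)).1 ≤ level then
      bisectLoop pairs level ((lo + hi) / 2 + 1) hi
    else
      bisectLoop pairs level lo ((lo + hi) / 2)
  else lo
termination_by hi - lo
decreasing_by
  · omega
  · omega

-- Source B's total(level)
def totalFast (T : Int) (pairs suf : List (Int × Int)) (n : Nat) (level : Int) : Int :=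
  T + (suf.getD (bisectLoop pairs level 0 n) (0, 0)).2
    - level * (suf.getD (bisectLoop pairs level 0 n) (0, 0)).1

def solution_alt (diffs : List Int) (times : List Int) (limit : Int) : Int :=
  match PySem.List.max? diffs (fun x => x) with
  | none => 0  -- Python raises ValueError on empty diffs; excluded by Pre_solution
  | some m =>
      let prev_times : List Int := 0 :: times
      let trip := diffs.zip (times.zip prev_times)
      let T := (trip.map (fun x => x.2.1)).sum
      let pairs := PySem.List.sorted (trip.map (fun x => (x.1, x.2.1 + x.2.2))) (fun y => y.1) false
      let suf := sufSums pairs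
      solutionLoop (fun mid => decide (totalFast T pairs suf pairs.length mid ≤ limit))
        1 (m + 1) 0

-- ===== PRECONDITION & SPEC =====
-- Pre_ excludes only empty diffs, on which both Pythons raise ValueError (max of
-- an empty sequence).
def Pre_solution (diffs : List Int) (times : List Int) (limit : Int) : Prop :=
  diffs ≠ []
instance (diffs : List Int) (times : List Int) (limit : Int) : Decidable (Pre_solution diffs times limit) := by unfold Pre_solution; infer_instance

def pvWitness_solution : List Int × List Int × Int := ([3, 2], [1, 4], 30)

def Spec_solution (diffs : List Int) (times : List Int) (limit : Int) (out : Int) : Prop := out = solution_alt diffs times limit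
instance (diffs : List Int) (times : List Int) (limit : Int) (out : Int) : Decidable (Spec_solution diffs times limit out) := by unfold Spec_solution; infer_instance

-- ===== CLAIM (what is proved, stated in full; the proofs are below) =====
def Claim_equal_solution : Prop := ∀ (diffs : List Int) (times : List Int) (limit : Int), Dom_solution diffs times limit → Pre_solution diffs times limit → Spec_solution diffs times limit (solution diffs times limit)

-- ===== LEMMAS AND PROOFS =====

-- splitting a sum of pointwise sums
theorem sum_map_add {α : Type} (f g : α → Int) :
    ∀ (z : List α), (z.map (fun x => f x + g x)).sum = (z.map f).sum + (z.map g).sum := by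
  intro z
  induction z with
  | nil => simp
  | cons x xs ih => simp [ih]; ring

-- below every difficulty in q, the weighted remaining-time sum is linear in the level
theorem seg_linear (m : Int) :
    ∀ (q : List (Int × Int)), (∀ y ∈ q, m < y.1) →
      (q.map (fun y => y.2 * max 0 (y.1 - m))).sum
        = (q.map (fun y => y.1 * y.2)).sum - m * (q.map (fun y => y.2)).sum := by
  intro q
  induction q with
  | nil => simp
  | cons y ys ih =>
    intro h
    have hy : m < y.1 := h y (List.mem_cons_self)
    have hmax : max 0 (y.1 - m) = y.1 - m := by omega
    simp only [List.map_cons, List.sum_cons, ih (fun z hz => h z (List.mem_cons_of_mem _ hz)), hmax]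
    ring

theorem sufSums_ne_nil : ∀ (q : List (Int × Int)), sufSums q ≠ [] := by
  intro q
  cases q with
  | nil => simp [sufSums]
  | cons hd rest =>
    obtain ⟨d, w⟩ := hd
    simp only [sufSums]
    cases sufSums rest with
    | nil => simp
    | cons p tl => simp

-- the suffix-sum table: entry i holds the sums over drop i
theorem sufSums_getD :
    ∀ (q : List (Int × Int)) (i : Nat), i ≤ q.length →
      (sufSums q).getD i (0, 0)
        = (((q.drop i).map (fun y => y.2)).sum, ((q.drop i).map (fun y => y.1 * y.2)).sum) := by
  intro q
  induction q with
  | nil =>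
    intro i hi
    have : i = 0 := by simpa using hi
    subst this
    simp [sufSums]
  | cons hd rest ih =>
    obtain ⟨d, w⟩ := hd
    intro i hi
    have h0 := ih 0 (by omega)
    cases hsr : sufSums rest with
    | nil => exact absurd hsr (sufSums_ne_nil rest)
    | cons p tl =>
      rw [hsr] at h0
      simp only [List.getD_cons_zero, List.drop_zero] at h0
      cases i with
      | zero =>
        simp only [sufSums, hsr, List.getD_cons_zero, List.drop_zero, List.map_cons,
          List.sum_cons, h0]
        rw [Prod.mk.injEq]
        exact ⟨by ring, by ring⟩
      | succ j =>
        have hj : j ≤ rest.length := by simpa using hi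
        have := ih j hj
        rw [hsr] at this
        simp only [sufSums, hsr, List.getD_cons_succ, List.drop_succ_cons]
        exact this

-- the bisect finds the boundary between difficulties ≤ level and > level
theorem bisect_spec (pairs : List (Int × Int)) (level : Int)
    (hsort : pairs.Pairwise (fun a b => a.1 ≤ b.1)) :
    ∀ (fuel : Nat) (lo hi : Nat), hi - lo = fuel → lo ≤ hi → hi ≤ pairs.length →
      (∀ i (h : i < pairs.length), i < lo → pairs[i].1 ≤ level) →
      (∀ i (h : i < pairs.length), hi ≤ i → level < pairs[i].1) →
      (bisectLoop pairs level lo hi ≤ pairs.length ∧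
        (∀ i (h : i < pairs.length), i < bisectLoop pairs level lo hi → pairs[i].1 ≤ level) ∧
        (∀ i (h : i < pairs.length), bisectLoop pairs level lo hi ≤ i → level < pairs[i].1)) := by
  have hpw := List.pairwise_iff_getElem.mp hsort
  intro fuel
  induction fuel using Nat.strong_induction_on with
  | _ fuel ih =>
    intro lo hi hfuel hlohi hhil hbelow habove
    rw [bisectLoop]
    by_cases h : lo < hi
    · simp only [h, dif_pos]
      have hmlen : (lo + hi) / 2 < pairs.length := by omega
      rw [List.getD_eq_getElem pairs (0, 0) hmlen]
      by_cases hc : pairs[(lo + hi) / 2].1 ≤ level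
      · rw [if_pos hc]
        refine ih (hi - ((lo + hi) / 2 + 1)) (by omega) ((lo + hi) / 2 + 1) hi rfl
          (by omega) hhil ?_ habove
        intro i hilen hilt
        rcases Nat.lt_or_ge i ((lo + hi) / 2) with hlt | hge
        · have := hpw i ((lo + hi) / 2) hilen hmlen hlt
          omega
        · have : i = (lo + hi) / 2 := by omega
          subst this; exact hc
      · rw [if_neg hc]
        refine ih (((lo + hi) / 2) - lo) (by omega) lo ((lo + hi) / 2) rfl
          (by omega) (by omega) hbelow ?_
        intro i hilen hge
        rcases Nat.eq_or_lt_of_le hge with heq | hlt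
        · subst heq; omega
        · have := hpw ((lo + hi) / 2) i hmlen hilen hlt
          omega
    · simp only [h, dif_neg, not_false_iff]
      exact ⟨by omega, fun i hl hlt => hbelow i hl (by omega),
        fun i hl hge => habove i hl (by omega)⟩

-- splitting the weighted sum at the bisect boundary
theorem split_sum (pairs : List (Int × Int)) (level : Int) (k : Nat)
    (hk : k ≤ pairs.length)
    (hlow : ∀ i (h : i < pairs.length), i < k → pairs[i].1 ≤ level)
    (hhigh : ∀ i (h : i < pairs.length), k ≤ i → level < pairs[i].1) :
    (pairs.map (fun y => y.2 * max 0 (y.1 - level))).sum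
      = ((pairs.drop k).map (fun y => y.1 * y.2)).sum
        - level * ((pairs.drop k).map (fun y => y.2)).sum := by
  conv_lhs => rw [← List.take_append_drop k pairs]
  rw [List.map_append, List.sum_append]
  have h1 : ((pairs.take k).map (fun y => y.2 * max 0 (y.1 - level))).sum = 0 := by
    apply List.sum_eq_zero
    intro x hx
    obtain ⟨y, hy, rfl⟩ := List.mem_map.mp hx
    obtain ⟨i, hl, rfl⟩ := List.mem_iff_getElem.mp hy
    have hik : i < k := by
      have := hl; simp only [List.length_take] at this; omega
    have hig : i < pairs.length := by
      have := hl; simp only [List.length_take] at this; omega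
    have hgt : (pairs.take k)[i] = pairs[i] := List.getElem_take
    rw [hgt]
    have := hlow i hig hik
    have hm0 : max 0 (pairs[i].1 - level) = 0 := by omega
    rw [hm0, mul_zero]
  rw [h1, zero_add]
  apply seg_linear
  intro y hy
  obtain ⟨j, hl, rfl⟩ := List.mem_iff_getElem.mp hy
  have hjl : k + j < pairs.length := by
    have := hl; simp only [List.length_drop] at this; omega
  have hgd : (pairs.drop k)[j] = pairs[k + j] := by
    rw [List.getElem_drop]
  rw [hgd]
  exact hhigh (k + j) hjl (by omega)

-- Source B's total(level) equals the weighted-sum form, for every level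
theorem totalFast_eq (T : Int) (pairs : List (Int × Int))
    (hsort : pairs.Pairwise (fun a b => a.1 ≤ b.1)) (level : Int) :
    totalFast T pairs (sufSums pairs) pairs.length level
      = (pairs.map (fun y => y.2 * max 0 (y.1 - level))).sum + T := by
  unfold totalFast
  have hb := bisect_spec pairs level hsort (pairs.length - 0) 0 pairs.length rfl
    (by omega) le_rfl (by intro i h hlt; omega) (by intro i h hge; omega)
  rw [sufSums_getD pairs _ hb.1]
  rw [split_sum pairs level _ hb.1 hb.2.1 hb.2.2]
  ring

-- ===== VERDICT (by name: the statement is the Claim_ definition above) =====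
theorem solution_spec : Claim_equal_solution := by
  intro diffs times limit _ _
  unfold Spec_solution solution solution_alt
  cases hmax : PySem.List.max? diffs (fun x => x) with
  | none => rfl
  | some top =>
    simp only []
    set z := diffs.zip (times.zip (0 :: times)) with hz
    set T := (z.map (fun x => x.2.1)).sum with hT
    set pairs := PySem.List.sorted (z.map (fun x => (x.1, x.2.1 + x.2.2))) (fun y => y.1) false
      with hpairs
    have hperm : pairs.Perm (z.map (fun x => (x.1, x.2.1 + x.2.2))) :=
      PySem.List.sorted_perm _ _ _
    have hGinv : ∀ m : Int, solveByLevel diffs times (0 :: times) m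
        = (pairs.map (fun y => y.2 * max 0 (y.1 - m))).sum + T := by
      intro m
      have h1 : solveByLevel diffs times (0 :: times) m
          = (z.map (fun x => (x.2.2 + x.2.1) * max 0 (x.1 - m))).sum
          + (z.map (fun x => x.2.1)).sum := by
        unfold solveByLevel
        rw [← hz, ← sum_map_add]
      rw [h1, ← hT]
      congr 1
      have h2 : ((z.map (fun x => (x.1, x.2.1 + x.2.2))).map
          (fun y => y.2 * max 0 (y.1 - m))).sum
          = (z.map (fun x => (x.2.2 + x.2.1) * max 0 (x.1 - m))).sum := by
        rw [List.map_map]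
        congr 1
        apply List.map_congr_left
        intro x _
        simp only [Function.comp_apply]
        ring
      rw [← h2]
      exact (List.Perm.sum_eq (List.Perm.map _ hperm)).symm
    have hpred : (fun mid => decide (solveByLevel diffs times (0 :: times) mid ≤ limit))
        = (fun mid => decide (totalFast T pairs (sufSums pairs) pairs.length mid ≤ limit)) := by
      funext mid
      rw [hGinv mid, totalFast_eq T pairs (PySem.List.sorted_pairwise _ _) mid]
    rw [hpred]
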